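-- pv_equiv track=rewrite | github.com/coco-in-bluemoon/hackerrank | Interview Preparation Kit/Search/Triple Sum/solution.py | solution
-- ===== SOURCE A (Python) =====
-- def solution(a, b, c):
--     answer = 0
--     a = sorted(set(a))
--     b = sorted(set(b))
--     c = sorted(set(c))
--
--     adx = 0
--     cdx = 0
--     for num in b:
--         while adx < len(a) and a[adx] <= num:
--             adx += 1
--         while cdx < len(c) and c[cdx] <= num:
--             cdx += 1
--
--         answer += (adx * cdx)
--
--     return answer
-- ===== SOURCE B (Python) =====
-- def solution(a, b, c):
--     a = sorted(set(a))
--     b = sorted(set(b))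
--     c = sorted(set(c))
--
--     def count_le(xs, v):
--         # binary search: number of elements of sorted xs that are <= v
--         lo, hi = 0, len(xs)
--         while lo < hi:
--             mid = (lo + hi) // 2
--             if xs[mid] <= v:
--                 lo = mid + 1
--             else:
--                 hi = mid
--         return lo
--
--     return sum(count_le(a, num) * count_le(c, num) for num in b)
-- ===== Notes on version B (the rewrite author's own statement) =====
-- stated objective: alternative
-- what changed: The two-pointer sweep with maintained adx/cdx state and while-loops is replaced by independent binary searches: for each num in sorted(set(b)) the counts of elements <= num in sorted(set(a)) and sorted(set(c)) are found by a bisect-right style binary search, with no state carried between iterations.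
import Mathlib
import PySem

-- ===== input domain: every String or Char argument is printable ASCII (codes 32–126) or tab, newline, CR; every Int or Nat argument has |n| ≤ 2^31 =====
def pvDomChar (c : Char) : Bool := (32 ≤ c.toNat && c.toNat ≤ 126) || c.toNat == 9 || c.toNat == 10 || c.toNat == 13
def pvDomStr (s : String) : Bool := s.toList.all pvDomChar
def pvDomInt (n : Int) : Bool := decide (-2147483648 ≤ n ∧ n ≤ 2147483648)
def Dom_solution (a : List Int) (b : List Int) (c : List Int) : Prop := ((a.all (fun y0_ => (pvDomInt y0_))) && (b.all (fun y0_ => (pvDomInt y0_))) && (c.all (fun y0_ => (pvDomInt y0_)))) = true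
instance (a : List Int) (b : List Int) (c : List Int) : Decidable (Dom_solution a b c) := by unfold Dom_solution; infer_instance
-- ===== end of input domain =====

-- B replaces A's two-pointer sweep (mutable adx/cdx while-loops) by an independent
-- bisect-right style binary search per element of b; same asymptotic cost (alternative).

-- ===== PORT A =====
-- the 'while adx < len(a) and a[adx] <= num: adx += 1' loop of A
def advA (xs : List Int) (num : Int) (i : Nat) : Nat :=
  if h : i < xs.length then
    if xs[i] ≤ num then advA xs num (i + 1) else i
  else i
termination_by xs.length - i

def solution (a : List Int) (b : List Int) (c : List Int) : Int :=
  let a' := PySem.List.sorted (PySem.Set.ofList a) (fun x => x)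
  let b' := PySem.List.sorted (PySem.Set.ofList b) (fun x => x)
  let c' := PySem.List.sorted (PySem.Set.ofList c) (fun x => x)
  (b'.foldl
    (fun (st : Nat × Nat × Int) num =>
      let adx := advA a' num st.1
      let cdx := advA c' num st.2.1
      (adx, cdx, st.2.2 + (adx : Int) * (cdx : Int)))
    (0, 0, 0)).2.2

-- ===== PORT B =====
-- hand-written binary search of Source B: number of elements of sorted xs that are ≤ v
def countLeGo (xs : List Int) (v : Int) (lo hi : Nat) : Nat :=
  if h : lo < hi then
    let mid := (lo + hi) / 2
    if xs.getD mid 0 ≤ v then countLeGo xs v (mid + 1) hi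
    else countLeGo xs v lo mid
  else lo
termination_by hi - lo
decreasing_by all_goals omega

def countLe (xs : List Int) (v : Int) : Nat := countLeGo xs v 0 xs.length

def solution_alt (a : List Int) (b : List Int) (c : List Int) : Int :=
  let a' := PySem.List.sorted (PySem.Set.ofList a) (fun x => x)
  let b' := PySem.List.sorted (PySem.Set.ofList b) (fun x => x)
  let c' := PySem.List.sorted (PySem.Set.ofList c) (fun x => x)
  (b'.map (fun num => (countLe a' num : Int) * (countLe c' num : Int))).sum

-- ===== PRECONDITION & SPEC =====
def Spec_solution (a : List Int) (b : List Int) (c : List Int) (out : Int) : Prop := out = solution_alt a b c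
instance (a : List Int) (b : List Int) (c : List Int) (out : Int) : Decidable (Spec_solution a b c out) := by unfold Spec_solution; infer_instance

-- ===== CLAIM (what is proved, stated in full; the proofs are below) =====
def Claim_equal_solution : Prop := ∀ (a : List Int) (b : List Int) (c : List Int), Dom_solution a b c → Spec_solution a b c (solution a b c)

-- ===== LEMMAS AND PROOFS =====

-- the binary search meets the bisect-right specification on a sorted list
theorem countLeGo_spec (xs : List Int) (v : Int) (hs : xs.Pairwise (· ≤ ·)) :
    ∀ (n lo hi : Nat), hi - lo ≤ n → hi ≤ xs.length → lo ≤ hi →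
    (∀ j (hj : j < xs.length), j < lo → xs[j] ≤ v) →
    (∀ j (hj : j < xs.length), hi ≤ j → v < xs[j]) →
    countLeGo xs v lo hi ≤ xs.length ∧
      (∀ j (hj : j < xs.length), j < countLeGo xs v lo hi → xs[j] ≤ v) ∧
      (∀ j (hj : j < xs.length), countLeGo xs v lo hi ≤ j → v < xs[j]) := by
  intro n
  induction n with
  | zero =>
    intro lo hi hn hhi hlo P Q
    have h : ¬ lo < hi := by omega
    rw [countLeGo, dif_neg h]
    exact ⟨by omega, fun j hj hjl => P j hj hjl, fun j hj hjg => Q j hj (by omega)⟩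
  | succ n ih =>
    intro lo hi hn hhi hlo P Q
    rw [countLeGo]
    by_cases h : lo < hi
    · rw [dif_pos h]
      have hmid : (lo + hi) / 2 < xs.length := by omega
      have hget : xs.getD ((lo + hi) / 2) 0 = xs[(lo + hi) / 2] := List.getD_eq_getElem _ _ hmid
      simp only [hget]
      have hpar := List.pairwise_iff_getElem.mp hs
      by_cases hle : xs[(lo + hi) / 2] ≤ v
      · rw [if_pos hle]
        exact ih ((lo + hi) / 2 + 1) hi (by omega) hhi (by omega)
          (by
            intro j hj hjlt
            rcases lt_or_ge j lo with h1 | h1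
            · exact P j hj h1
            · rcases eq_or_lt_of_le (Nat.lt_succ_iff.mp hjlt) with h2 | h2
              · subst h2; exact hle
              · exact le_trans (hpar j ((lo + hi) / 2) hj hmid h2) hle)
          Q
      · rw [if_neg hle]
        exact ih lo ((lo + hi) / 2) (by omega) (by omega) (by omega) P
          (by
            intro j hj hjge
            rcases eq_or_lt_of_le hjge with h2 | h2
            · subst h2; exact lt_of_not_ge hle
            · exact lt_of_lt_of_le (lt_of_not_ge hle) (hpar _ j hmid hj h2))
    · rw [dif_neg h]
      exact ⟨by omega, fun j hj hjl => P j hj hjl, fun j hj hjg => Q j hj (by omega)⟩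

theorem countLe_spec (xs : List Int) (v : Int) (hs : xs.Pairwise (· ≤ ·)) :
    countLe xs v ≤ xs.length ∧
      (∀ j (hj : j < xs.length), j < countLe xs v → xs[j] ≤ v) ∧
      (∀ j (hj : j < xs.length), countLe xs v ≤ j → v < xs[j]) := by
  unfold countLe
  exact countLeGo_spec xs v hs xs.length 0 xs.length (by omega) (le_refl _) (Nat.zero_le _)
    (fun j hj hj0 => absurd hj0 (Nat.not_lt_zero j))
    (fun j hj hjge => absurd hj (by omega))

-- countLe is monotone in v on a sorted list
theorem countLe_mono (xs : List Int) (v w : Int) (hs : xs.Pairwise (· ≤ ·)) (hvw : v ≤ w) :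
    countLe xs v ≤ countLe xs w := by
  obtain ⟨h1, h2, h3⟩ := countLe_spec xs v hs
  obtain ⟨h1', h2', h3'⟩ := countLe_spec xs w hs
  by_contra hlt
  push Not at hlt
  have hjlen : countLe xs w < xs.length := lt_of_lt_of_le hlt h1
  have := h2 (countLe xs w) hjlen hlt
  have := h3' (countLe xs w) hjlen (le_refl _)
  omega

-- A's while-loop, started at or before the answer, lands exactly on countLe
theorem advA_eq (xs : List Int) (num : Int) (hs : xs.Pairwise (· ≤ ·)) :
    ∀ i, i ≤ countLe xs num → advA xs num i = countLe xs num := by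
  obtain ⟨h1, h2, h3⟩ := countLe_spec xs num hs
  have stop : advA xs num (countLe xs num) = countLe xs num := by
    rw [advA]
    by_cases hlen : countLe xs num < xs.length
    · rw [dif_pos hlen, if_neg (not_le.mpr (h3 _ hlen (le_refl _)))]
    · rw [dif_neg hlen]
  have key : ∀ (n i : Nat), countLe xs num - i ≤ n → i ≤ countLe xs num →
      advA xs num i = countLe xs num := by
    intro n
    induction n with
    | zero =>
      intro i hn hi
      have heq : i = countLe xs num := by omega
      rw [heq, stop]
    | succ n ih =>
      intro i hn hi
      rcases eq_or_lt_of_le hi with heq | hlt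
      · rw [heq, stop]
      · have hilen : i < xs.length := lt_of_lt_of_le hlt h1
        rw [advA, dif_pos hilen, if_pos (h2 i hilen hlt)]
        exact ih (i + 1) (by omega) (by omega)
  exact fun i hi => key (countLe xs num) i (by omega) hi

-- the fold of A over a sorted b computes B's sum, given the pointers start below their next targets
theorem loop_eq (A C : List Int) (hA : A.Pairwise (· ≤ ·)) (hC : C.Pairwise (· ≤ ·)) :
    ∀ (bs : List Int), bs.Pairwise (· ≤ ·) →
    ∀ (i j : Nat) (s : Int),
    (∀ num ∈ bs, i ≤ countLe A num ∧ j ≤ countLe C num) →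
    (bs.foldl
      (fun (st : Nat × Nat × Int) num =>
        let adx := advA A num st.1
        let cdx := advA C num st.2.1
        (adx, cdx, st.2.2 + (adx : Int) * (cdx : Int)))
      (i, j, s)).2.2
      = s + (bs.map (fun num => (countLe A num : Int) * (countLe C num : Int))).sum := by
  intro bs
  induction bs with
  | nil => intro _ i j s _; simp
  | cons num t iht =>
    intro hbs i j s hinv
    rw [List.pairwise_cons] at hbs
    obtain ⟨hnum, ht⟩ := hbs
    obtain ⟨hia, hjc⟩ := hinv num (List.mem_cons_self)
    simp only [List.foldl_cons, List.map_cons, List.sum_cons]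
    rw [advA_eq A num hA i hia, advA_eq C num hC j hjc]
    rw [iht ht _ _ _ (by
      intro num' hnum'
      exact ⟨countLe_mono A num num' hA (hnum num' hnum'),
             countLe_mono C num num' hC (hnum num' hnum')⟩)]
    ring

-- ===== VERDICT (by name: the statement is the Claim_ definition above) =====
theorem solution_spec : Claim_equal_solution := by
  intro a b c _
  unfold Spec_solution solution solution_alt
  have hA : (PySem.List.sorted (PySem.Set.ofList a) (fun x => x)).Pairwise (· ≤ ·) :=
    (PySem.List.sorted_ofList_pairwise_lt a).imp le_of_lt
  have hC : (PySem.List.sorted (PySem.Set.ofList c) (fun x => x)).Pairwise (· ≤ ·) :=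
    (PySem.List.sorted_ofList_pairwise_lt c).imp le_of_lt
  have hB : (PySem.List.sorted (PySem.Set.ofList b) (fun x => x)).Pairwise (· ≤ ·) :=
    (PySem.List.sorted_ofList_pairwise_lt b).imp le_of_lt
  have := loop_eq _ _ hA hC _ hB 0 0 0
    (fun num _ => ⟨Nat.zero_le _, Nat.zero_le _⟩)
  simpa using this
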